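-- pv_equiv track=rewrite | github.com/ismylvdya/MiSAD_k-means | main.py | matches_counts_in
-- ===== SOURCE A (Python) =====
-- def matches_counts_in(clusters, targets, k):
--     '''возвращает tuple (количество совпадающих точек, индексы несовпадений) между нашей кластеризацией (на k кластеров) и эталонной С УЧЕТОМ РАЗНОЙ НУМЕРАЦИИ КЛАСТЕРОВ'''
--
--     matches_count = 0
--     diff_indexes = []
--
--     posible_pairs = {} # словарь типа {(элемент_из_clusters, элемент_из_targets) : ск_раз_встретилась_эта_пара}
--
--     for i in range(len(clusters)):
--         cur_pair = (clusters[i], targets[i])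
--         if cur_pair not in posible_pairs:
--             posible_pairs[(clusters[i], targets[i])] = 1
--         else:
--             posible_pairs[(clusters[i], targets[i])] += 1
--
--     top_k_pairs = sorted(posible_pairs, key=posible_pairs.get, reverse=True)[:k] # -- массив из тех K пар кластеров, которые встретились чаще других
--
--     for i in range(len(clusters)):
--         cur_pair = (clusters[i], targets[i])
--         if cur_pair in top_k_pairs:
--             matches_count += 1
--         else:
--             diff_indexes.append(i)
--
--     return (matches_count, diff_indexes)
-- ===== SOURCE B (Python) =====
-- def matches_counts_in(clusters, targets, k):
--     '''Group point indices by (cluster, target) pair once; the match count is the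
--     sum of the top-k group sizes and the diff indexes are the remaining groups'
--     indices re-sorted ascending -- no second per-point scan.'''
--     groups = {}
--     for i, pair in enumerate(zip(clusters, targets)):
--         groups[pair] = groups.get(pair, []) + [i]
--     top = set(sorted(groups, key=lambda p: len(groups[p]), reverse=True)[:k])
--     matches_count = sum(len(groups[p]) for p in top)
--     diff_indexes = sorted(i for p in groups if p not in top for i in groups[p])
--     return (matches_count, diff_indexes)
-- ===== Notes on version B (the rewrite author's own statement) =====
-- stated objective: alternative
-- what changed: B builds one dict mapping each (cluster, target) pair to its list of point indices, takes matches_count as the sum of the top-k group sizes and recovers diff_indexes by re-sorting the remaining groups' indices, eliminating A's second per-point classification scan.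
import Mathlib
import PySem

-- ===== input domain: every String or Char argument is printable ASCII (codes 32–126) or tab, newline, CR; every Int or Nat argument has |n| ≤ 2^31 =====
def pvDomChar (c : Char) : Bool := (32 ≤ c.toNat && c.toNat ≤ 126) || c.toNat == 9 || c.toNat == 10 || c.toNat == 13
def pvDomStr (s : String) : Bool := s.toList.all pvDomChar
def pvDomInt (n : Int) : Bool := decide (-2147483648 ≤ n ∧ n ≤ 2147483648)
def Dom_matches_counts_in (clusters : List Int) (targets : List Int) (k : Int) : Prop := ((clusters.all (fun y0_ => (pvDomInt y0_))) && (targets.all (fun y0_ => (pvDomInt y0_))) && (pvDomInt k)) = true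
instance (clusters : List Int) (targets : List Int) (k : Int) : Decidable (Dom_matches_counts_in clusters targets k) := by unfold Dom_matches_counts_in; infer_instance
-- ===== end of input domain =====

-- B groups the point indices by (cluster, target) pair once, takes the match count as the
-- sum of the top-k group sizes and re-sorts the remaining groups' indices for diff_indexes,
-- removing A's second per-point scan (objective: alternative decomposition, same asymptotics).

-- ===== PORT A =====
-- clusters[i]/targets[i] ported as pyGetD (exact under Pre_: both indexes are in range);
-- key=posible_pairs.get ported as getD 0 (exact: every element sorted there is a key of the dict)
def matches_counts_in (clusters : List Int) (targets : List Int) (k : Int) : Int × List Int :=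
  let posible_pairs : PySem.Dict (Int × Int) Int :=
    (PySem.List.pyRange 0 (PySem.List.len clusters) 1).foldl
      (fun d i =>
        let cur_pair := (PySem.List.pyGetD clusters i 0, PySem.List.pyGetD targets i 0)
        if d.contains cur_pair = false then d.insert cur_pair 1
        else d.insert cur_pair (d.getD cur_pair 0 + 1))
      PySem.Dict.empty
  let top_k_pairs : List (Int × Int) :=
    PySem.List.slice
      (PySem.List.sorted posible_pairs.keys (fun p => posible_pairs.getD p 0) true)
      none (some k)
  (PySem.List.pyRange 0 (PySem.List.len clusters) 1).foldl
    (fun acc i =>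
      let cur_pair := (PySem.List.pyGetD clusters i 0, PySem.List.pyGetD targets i 0)
      if top_k_pairs.contains cur_pair then (acc.1 + 1, acc.2)
      else (acc.1, acc.2 ++ [i]))
    ((0 : Int), ([] : List Int))

-- ===== PORT B =====
def matches_counts_in_alt (clusters : List Int) (targets : List Int) (k : Int) : Int × List Int :=
  let groups : PySem.Dict (Int × Int) (List Int) :=
    (PySem.List.enumerate (clusters.zip targets)).foldl
      (fun d e => d.modify e.2 [] (fun l => l ++ [e.1]))
      PySem.Dict.empty
  let top : PySem.Set (Int × Int) :=
    PySem.Set.ofList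
      (PySem.List.slice
        (PySem.List.sorted groups.keys (fun p => ((groups.getD p []).length : Int)) true)
        none (some k))
  let matches_count : Int := (top.map (fun p => ((groups.getD p []).length : Int))).sum
  let diff_indexes : List Int :=
    PySem.List.sorted
      ((groups.keys.filter (fun p => !(PySem.Set.contains top p))).flatMap
        (fun p => groups.getD p []))
      (fun x => x)
  (matches_count, diff_indexes)


-- ===== PRECONDITION & SPEC =====
-- Pre_ excludes only the inputs where targets is shorter than clusters: there A raises IndexError.
def Pre_matches_counts_in (clusters : List Int) (targets : List Int) (k : Int) : Prop :=
  clusters.length ≤ targets.length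
instance (clusters : List Int) (targets : List Int) (k : Int) : Decidable (Pre_matches_counts_in clusters targets k) := by unfold Pre_matches_counts_in; infer_instance

def pvWitness_matches_counts_in : List Int × List Int × Int := ([0, 0, 1], [1, 1, 2], 2)

def Spec_matches_counts_in (clusters : List Int) (targets : List Int) (k : Int) (out : Int × List Int) : Prop := out = matches_counts_in_alt clusters targets k
instance (clusters : List Int) (targets : List Int) (k : Int) (out : Int × List Int) : Decidable (Spec_matches_counts_in clusters targets k out) := by unfold Spec_matches_counts_in; infer_instance

-- ===== CLAIM (what is proved, stated in full; the proofs are below) =====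
def Claim_equal_matches_counts_in : Prop := ∀ (clusters : List Int) (targets : List Int) (k : Int), Dom_matches_counts_in clusters targets k → Pre_matches_counts_in clusters targets k → Spec_matches_counts_in clusters targets k (matches_counts_in clusters targets k)


-- ===== LEMMAS AND PROOFS =====

def pvPairAt (clusters : List Int) (targets : List Int) (i : Int) : Int × Int :=
  (PySem.List.pyGetD clusters i 0, PySem.List.pyGetD targets i 0)
def pvR (clusters : List Int) : List Int :=
  PySem.List.pyRange 0 (PySem.List.len clusters) 1

theorem pvMapPair (c t : List Int) (h : c.length ≤ t.length) :
    (pvR c).map (pvPairAt c t) = c.zip t := by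
  unfold pvR
  rw [PySem.List.len_eq, PySem.List.pyRange_one]
  simp only [sub_zero, Int.toNat_natCast, List.map_map]
  apply List.ext_getElem
  · simp [List.length_zip]; omega
  · intro i h1 h2
    simp only [List.getElem_map, List.getElem_range, Function.comp_apply, List.getElem_zip]
    simp only [List.length_map, List.length_range] at h1
    unfold pvPairAt
    simp only [zero_add, PySem.List.pyGetD_natCast]
    rw [List.getD_eq_getElem _ _ h1, List.getD_eq_getElem _ _ (by omega)]

theorem pvCountsEq (c t : List Int) (h : c.length ≤ t.length) :
    ((pvR c).foldl
      (fun d i =>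
        let cur_pair := pvPairAt c t i
        if d.contains cur_pair = false then d.insert cur_pair 1
        else d.insert cur_pair (d.getD cur_pair 0 + 1))
      PySem.Dict.empty) = PySem.Dict.counter (c.zip t) := by
  have hstep : (fun (d : PySem.Dict (Int × Int) Int) i =>
        let cur_pair := pvPairAt c t i
        if d.contains cur_pair = false then d.insert cur_pair 1
        else d.insert cur_pair (d.getD cur_pair 0 + 1))
      = (fun d i => d.insert (pvPairAt c t i) (d.getD (pvPairAt c t i) 0 + 1)) := by
    funext d i
    by_cases hc : d.contains (pvPairAt c t i) = false
    · simp [hc, PySem.Dict.getD_of_not_contains d 0 hc]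
    · simp [hc]
  rw [hstep, ← List.foldl_map (f := pvPairAt c t)
      (g := fun (d : PySem.Dict (Int × Int) Int) p => d.insert p (d.getD p 0 + 1)),
    pvMapPair c t h, PySem.Dict.foldl_insert_getD_add_one_eq_counter]

theorem pvPairAt_eq (c t : List Int) (h : c.length ≤ t.length) (j : Int)
    (h0 : 0 ≤ j) (h1 : j < (c.length : Int)) :
    PySem.List.pyGetD (c.zip t) j (0, 0) = pvPairAt c t j := by
  have hL : (c.zip t).length = c.length := by simp [List.length_zip]; omega
  rw [PySem.List.pyGetD_eq_getElem _ _ h0 (by rw [hL]; exact_mod_cast h1)]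
  unfold pvPairAt
  rw [PySem.List.pyGetD_eq_getElem _ _ h0 (by exact_mod_cast h1),
      PySem.List.pyGetD_eq_getElem _ _ h0 (by omega)]
  simp [List.getElem_zip]

theorem pvGroupsGetD (c t : List Int) (h : c.length ≤ t.length) (p : Int × Int) :
    ((PySem.List.enumerate (c.zip t)).foldl
      (fun d e => d.modify e.2 [] (fun l => l ++ [e.1])) PySem.Dict.empty).getD p []
    = (pvR c).filter (fun i => pvPairAt c t i == p) := by
  have hswap : (PySem.List.enumerate (c.zip t)).foldl
      (fun d e => d.modify e.2 [] (fun l => l ++ [e.1])) PySem.Dict.empty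
      = ((PySem.List.enumerate (c.zip t)).map Prod.swap).foldl
      (fun d (q : (Int × Int) × Int) => d.modify q.1 [] (fun l => l ++ [q.2])) PySem.Dict.empty := by
    rw [List.foldl_map]; rfl
  rw [hswap, PySem.Dict.getD_foldl_modify_append]
  have hlen : PySem.List.len (c.zip t) = (c.length : Int) := by
    simp [PySem.List.len_eq, List.length_zip]; omega
  rw [PySem.List.enumerate_eq_map_pyRange (c.zip t) (0, 0), hlen]
  simp only [PySem.Dict.getD_empty, List.map_map, List.filter_map, List.nil_append]
  have hcg : ∀ i ∈ PySem.List.pyRange 0 (c.length : Int) 1,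
      (((fun (p_1 : (Int × Int) × Int) => p_1.1 == p) ∘ Prod.swap ∘
        fun j => (j, PySem.List.pyGetD (c.zip t) j (0, 0))) i)
      = (pvPairAt c t i == p) := by
    intro i hi
    rw [PySem.List.mem_pyRange_one] at hi
    simp [Function.comp, pvPairAt_eq c t h i hi.1 hi.2]
  rw [List.filter_congr hcg]
  unfold pvR
  rw [PySem.List.len_eq]
  have : ((fun (x : (Int × Int) × Int) => x.2) ∘ Prod.swap ∘
      fun j => (j, PySem.List.pyGetD (c.zip t) j (0, 0))) = fun j => j := by
    funext j; rfl
  rw [this, List.map_id']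

theorem pvGroupsKeys (c t : List Int) :
    ((PySem.List.enumerate (c.zip t)).foldl
      (fun d e => d.modify e.2 [] (fun l => l ++ [e.1])) PySem.Dict.empty).keys
    = PySem.Set.ofList (c.zip t) := by
  rw [PySem.Dict.keys_foldl_modify_key (PySem.List.enumerate (c.zip t))
      (fun e => e.2) [] (fun _ e l => l ++ [e.1]) PySem.Dict.empty]
  rw [PySem.List.map_snd_enumerate]
  simp [PySem.Set.update, PySem.Set.ofList_eq_foldl, PySem.Dict.keys_empty]

theorem pvFibLen (c t : List Int) (h : c.length ≤ t.length) (p : Int × Int) :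
    ((pvR c).filter (fun i => pvPairAt c t i == p)).length = (c.zip t).count p := by
  rw [← List.countP_eq_length_filter, ← pvMapPair c t h, List.count_eq_countP, List.countP_map]
  rfl

theorem pvSliceSublist {α : Type} (xs : List α) (k : Int) :
    (PySem.List.slice xs none (some k)).Sublist xs := by
  unfold PySem.List.slice
  exact (List.take_sublist _ _).trans (List.drop_sublist _ _)

theorem pvCountPOr (hd : Int × Int) (T l : List (Int × Int)) (hhd : hd ∉ T) :
    l.countP (fun x => decide (x = hd) || decide (x ∈ T))
      = l.count hd + l.countP (fun x => decide (x ∈ T)) := by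
  induction l with
  | nil => simp
  | cons y l ih =>
    simp only [List.countP_cons, List.count_cons, ih]
    by_cases hy : y = hd
    · subst hy
      simp [hhd]
      omega
    · simp [hy]
      omega

theorem pvSumCount (T l : List (Int × Int)) (hT : T.Nodup) :
    (T.map (fun p => ((l.count p : Nat) : Int))).sum
      = ((l.countP (fun x => decide (x ∈ T)) : Nat) : Int) := by
  induction T with
  | nil => simp
  | cons hd T ih =>
    have hnd := List.nodup_cons.mp hT
    have hp : (fun (x : Int × Int) => decide (x ∈ hd :: T))
        = (fun x => decide (x = hd) || decide (x ∈ T)) := by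
      funext x; simp [List.mem_cons]
    rw [hp, pvCountPOr hd T l hnd.1]
    simp only [List.map_cons, List.sum_cons, ih hnd.2]
    push_cast
    ring

theorem pvDiffPerm (c t : List Int) (h : c.length ≤ t.length) (T : List (Int × Int)) :
    ((pvR c).filter (fun i => !(decide (pvPairAt c t i ∈ T)))).Perm
      (((PySem.Set.ofList (c.zip t)).filter (fun p => !(decide (p ∈ T)))).flatMap
        (fun p => (pvR c).filter (fun i => pvPairAt c t i == p))) := by
  have hPmem : ∀ i ∈ pvR c, pvPairAt c t i ∈ c.zip t := by
    intro i hi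
    rw [← pvMapPair c t h]
    exact List.mem_map_of_mem hi
  have hnodR : (pvR c).Nodup := PySem.List.nodup_pyRange_one 0 _
  have hflat : ∀ (ks : List (Int × Int)), ks.Nodup →
      (ks.flatMap (fun p => (pvR c).filter (fun i => pvPairAt c t i == p))).Nodup := by
    intro ks hks
    induction ks with
    | nil => simp
    | cons p ks ih =>
      have hnd := List.nodup_cons.mp hks
      rw [List.flatMap_cons, List.nodup_append]
      refine ⟨hnodR.filter _, ih hnd.2, ?_⟩
      intro a ha b hb
      rw [List.mem_filter, beq_iff_eq] at ha
      rw [List.mem_flatMap] at hb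
      obtain ⟨q, hq, hbq⟩ := hb
      rw [List.mem_filter, beq_iff_eq] at hbq
      intro hab
      exact hnd.1 (by rw [← ha.2, hab, hbq.2]; exact hq)
  apply (List.perm_ext_iff_of_nodup (hnodR.filter _)
    (hflat _ ((PySem.Set.nodup_ofList _).filter _))).mpr
  intro a
  constructor
  · intro ha
    rw [List.mem_filter] at ha
    rw [List.mem_flatMap]
    refine ⟨pvPairAt c t a, ?_, ?_⟩
    · rw [List.mem_filter]
      exact ⟨(PySem.Set.mem_ofList _ _).mpr (hPmem a ha.1), ha.2⟩
    · rw [List.mem_filter]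
      exact ⟨ha.1, by simp⟩
  · intro ha
    rw [List.mem_flatMap] at ha
    obtain ⟨q, hq, haq⟩ := ha
    rw [List.mem_filter] at hq haq
    rw [beq_iff_eq] at haq
    rw [List.mem_filter]
    exact ⟨haq.1, by rw [haq.2]; exact hq.2⟩

def pvT (c t : List Int) (k : Int) : List (Int × Int) :=
  PySem.List.slice
    (PySem.List.sorted (PySem.Set.ofList (c.zip t)) (fun p => (((c.zip t).count p : Nat) : Int)) true)
    none (some k)

theorem pvTNodup (c t : List Int) (k : Int) : (pvT c t k).Nodup :=
  (pvSliceSublist _ _).nodup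
    (((PySem.List.sorted_perm _ _ _).nodup_iff).mpr (PySem.Set.nodup_ofList _))

theorem pvPortAEq (c t : List Int) (k : Int) (h : c.length ≤ t.length) :
    matches_counts_in c t k =
      ((((c.zip t).countP (fun x => decide (x ∈ pvT c t k)) : Nat) : Int),
        (pvR c).filter (fun i => !(decide (pvPairAt c t i ∈ pvT c t k)))) := by
  have hcounts := pvCountsEq c t h
  simp only [pvPairAt, pvR] at hcounts
  rw [matches_counts_in]
  simp only []
  rw [hcounts, PySem.Dict.keys_counter]
  have hkey : (fun p => (PySem.Dict.counter (c.zip t)).getD p 0)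
      = (fun p => (((c.zip t).count p : Nat) : Int)) :=
    funext fun p => PySem.Dict.getD_counter _ p
  rw [hkey]
  have hTdef : PySem.List.slice
      (PySem.List.sorted (PySem.Set.ofList (c.zip t)) (fun p => ((c.zip t).count p : Int)) true)
      none (some k) = pvT c t k := rfl
  rw [hTdef]
  have hbody : (fun (acc : Int × List Int) (i : Int) =>
      if (pvT c t k).contains (PySem.List.pyGetD c i 0, PySem.List.pyGetD t i 0) then (acc.1 + 1, acc.2)
      else (acc.1, acc.2 ++ [i]))
    = (fun acc i =>
        ((fun (a : Int) (i : Int) =>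
            if decide ((PySem.List.pyGetD c i 0, PySem.List.pyGetD t i 0) ∈ pvT c t k)
            then a + 1 else a) acc.1 i,
         (fun (d : List Int) (i : Int) =>
            if (!(decide ((PySem.List.pyGetD c i 0, PySem.List.pyGetD t i 0) ∈ pvT c t k)))
            then d ++ [i] else d) acc.2 i)) := by
    funext acc i
    by_cases hm : (PySem.List.pyGetD c i 0, PySem.List.pyGetD t i 0) ∈ pvT c t k
    · simp [hm]
    · simp [hm]
  rw [hbody, PySem.List.foldl_prod_mk
      (f := fun (a : Int) (i : Int) =>
        if decide ((PySem.List.pyGetD c i 0, PySem.List.pyGetD t i 0) ∈ pvT c t k) then a + 1 else a)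
      (g := fun (d : List Int) (i : Int) =>
        if (!(decide ((PySem.List.pyGetD c i 0, PySem.List.pyGetD t i 0) ∈ pvT c t k))) then d ++ [i] else d),
    PySem.List.foldl_if_add_one, PySem.List.foldl_append_if_eq_filter]
  have hcnt : (PySem.List.pyRange 0 (PySem.List.len c) 1).countP
        (fun i => decide ((PySem.List.pyGetD c i 0, PySem.List.pyGetD t i 0) ∈ pvT c t k))
      = (c.zip t).countP (fun x => decide (x ∈ pvT c t k)) := by
    have := pvMapPair c t h
    simp only [pvR] at this
    rw [← this, List.countP_map]
    rfl
  rw [hcnt]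
  simp only [zero_add, List.nil_append]
  rfl

theorem pvPortBEq (c t : List Int) (k : Int) (h : c.length ≤ t.length) :
    matches_counts_in_alt c t k =
      ((((c.zip t).countP (fun x => decide (x ∈ pvT c t k)) : Nat) : Int),
        (pvR c).filter (fun i => !(decide (pvPairAt c t i ∈ pvT c t k)))) := by
  rw [matches_counts_in_alt]
  have hklen : (fun p => ((((PySem.List.enumerate (c.zip t)).foldl
        (fun d e => d.modify e.2 [] (fun l => l ++ [e.1]))
        PySem.Dict.empty).getD p []).length : Int))
      = (fun p => (((c.zip t).count p : Nat) : Int)) := by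
    funext p
    rw [pvGroupsGetD c t h p, pvFibLen c t h p]
  have hflatarg : (fun p => ((PySem.List.enumerate (c.zip t)).foldl
        (fun d e => d.modify e.2 [] (fun l => l ++ [e.1]))
        PySem.Dict.empty).getD p [])
      = (fun p => (pvR c).filter (fun i => pvPairAt c t i == p)) :=
    funext (pvGroupsGetD c t h)
  rw [hklen, hflatarg, pvGroupsKeys c t]
  have hTdef : PySem.List.slice
      (PySem.List.sorted (PySem.Set.ofList (c.zip t)) (fun p => ((c.zip t).count p : Int)) true)
      none (some k) = pvT c t k := rfl
  rw [hTdef, PySem.Set.ofList_eq_self_of_nodup _ (pvTNodup c t k)]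
  have hcong : (fun p => !(PySem.Set.contains (pvT c t k) p))
      = (fun p => !(decide (p ∈ pvT c t k))) := by
    funext p
    simp [pysem]
  rw [hcong, Prod.mk.injEq]
  refine ⟨?_, ?_⟩
  · -- matches_count
    exact pvSumCount (pvT c t k) (c.zip t) (pvTNodup c t k)
  · -- diff_indexes
    apply PySem.List.sorted_eq_of_perm_of_pairwise_lt _ _ (fun x => x)
      (pvDiffPerm c t h (pvT c t k))
    simpa using (PySem.List.pairwise_lt_pyRange_one 0 (PySem.List.len c)).filter _

-- ===== VERDICT (by name: the statement is the Claim_ definition above) =====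
theorem matches_counts_in_spec : Claim_equal_matches_counts_in := by
  intro clusters targets k _ hpre
  unfold Pre_matches_counts_in at hpre
  unfold Spec_matches_counts_in
  rw [pvPortAEq clusters targets k hpre, pvPortBEq clusters targets k hpre]
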